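-- pv_equiv track=rewrite | github.com/yjk82693/CMPSC131 | Auto-Grader.py | get_highestProject
-- ===== SOURCE A (Python) =====
-- def get_highestProject(data):
--     maximum = data[0][-1]
--     maxname = data[0][0]
--     for i in range(1, len(data)):
--         if data[i][-1] > maximum:
--             maximum = data[i][-1]
--             maxname = data[i][0]
--     return maxname
-- ===== SOURCE B (Python) =====
-- def get_highestProject(data):
--     return sorted(data, key=lambda e: e[-1], reverse=True)[0][0]
-- ===== Notes on version B (the rewrite author's own statement) =====
-- stated objective: idiomatic
-- what changed: Replaces A's manual index loop tracking a running maximum with a stable descending sort by the last element and taking the first row's name; stability with reverse=True preserves A's first-occurring-maximum tie rule.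
import Mathlib
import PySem

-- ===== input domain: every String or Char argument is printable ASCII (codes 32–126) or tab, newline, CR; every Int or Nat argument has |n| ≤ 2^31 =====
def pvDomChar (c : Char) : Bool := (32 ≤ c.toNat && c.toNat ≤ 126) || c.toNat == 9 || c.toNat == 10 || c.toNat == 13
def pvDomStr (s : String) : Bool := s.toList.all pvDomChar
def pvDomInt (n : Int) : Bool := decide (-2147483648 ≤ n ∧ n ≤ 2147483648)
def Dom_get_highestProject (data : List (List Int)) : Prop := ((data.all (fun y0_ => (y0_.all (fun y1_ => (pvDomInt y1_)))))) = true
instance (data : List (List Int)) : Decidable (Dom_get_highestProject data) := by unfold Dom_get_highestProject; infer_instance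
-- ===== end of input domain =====

-- B replaces A's manual running-maximum index loop with a stable descending sort by the
-- last element and taking the first row's name (idiomatic; same result, not faster).

-- ===== PORT A =====
-- literal transliteration of A: running (maximum, maxname) over range(1, len(data));
-- pyGetD defaults (0 / []) are never used inside Pre_ (data and all rows nonempty).
def get_highestProject (data : List (List Int)) : Int :=
  let maximum : Int := PySem.List.pyGetD (PySem.List.pyGetD data 0 []) (-1) 0
  let maxname : Int := PySem.List.pyGetD (PySem.List.pyGetD data 0 []) 0 0
  let st := (PySem.List.pyRange 1 (PySem.List.len data)).foldl
    (fun (st : Int × Int) (i : Int) =>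
      if st.1 < PySem.List.pyGetD (PySem.List.pyGetD data i []) (-1) 0 then
        (PySem.List.pyGetD (PySem.List.pyGetD data i []) (-1) 0,
         PySem.List.pyGetD (PySem.List.pyGetD data i []) 0 0)
      else st)
    (maximum, maxname)
  st.2

-- ===== PORT B =====
-- literal transliteration of B: sorted(data, key=lambda e: e[-1], reverse=True)[0][0];
-- the [] branch (Python's IndexError on empty data) is outside Pre_.
def get_highestProject_alt (data : List (List Int)) : Int :=
  match PySem.List.sorted data (fun e => PySem.List.pyGetD e (-1) 0) true with
  | [] => 0
  | r :: _ => PySem.List.pyGetD r 0 0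

-- ===== PRECONDITION & SPEC =====
-- Pre_ excludes exactly the inputs where Python A raises IndexError: empty data, or a row
-- with no entries (data[i][-1] / data[0][0]).
def Pre_get_highestProject (data : List (List Int)) : Prop :=
  data ≠ [] ∧ ∀ r ∈ data, r ≠ []
instance (data : List (List Int)) : Decidable (Pre_get_highestProject data) := by
  unfold Pre_get_highestProject; infer_instance
def pvWitness_get_highestProject : List (List Int) := [[1, 5], [2, 9], [3, 9]]
def Spec_get_highestProject (data : List (List Int)) (out : Int) : Prop := out = get_highestProject_alt data
instance (data : List (List Int)) (out : Int) : Decidable (Spec_get_highestProject data out) := by unfold Spec_get_highestProject; infer_instance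

-- ===== CLAIM (what is proved, stated in full; the proofs are below) =====
def Claim_equal_get_highestProject : Prop := ∀ (data : List (List Int)), Dom_get_highestProject data → Pre_get_highestProject data → Spec_get_highestProject data (get_highestProject data)

-- ===== LEMMAS AND PROOFS =====

-- insertBy with the reverse-sort comparison, unfolded on a cons.
theorem pv_insertBy_cons (key : List Int → Int) (x h : List Int) (t : List (List Int)) :
    PySem.List.insertBy (fun a b => decide (key b < key a)) x (h :: t)
      = if key h < key x then x :: h :: t
        else h :: PySem.List.insertBy (fun a b => decide (key b < key a)) x t := by
  simp [PySem.List.insertBy]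

-- head of the insertion-sort fold is the strict-update running maximum (first max wins).
theorem pv_foldl_insertBy_head (key : List Int → Int) :
    ∀ (xs : List (List Int)) (h : List Int) (t : List (List Int)),
      ∃ t', xs.foldl (fun acc x => PySem.List.insertBy (fun a b => decide (key b < key a)) x acc) (h :: t)
        = (xs.foldl (fun m x => if key m < key x then x else m) h) :: t' := by
  intro xs
  induction xs with
  | nil => intro h t; exact ⟨t, rfl⟩
  | cons x xs ih =>
    intro h t
    simp only [List.foldl_cons, pv_insertBy_cons]
    by_cases hc : key h < key x
    · simpa [hc] using ih x (h :: t)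
    · simpa [hc] using ih h (PySem.List.insertBy (fun a b => decide (key b < key a)) x t)

-- the (maximum, maxname) pair fold equals (key, name) of the element running maximum.
theorem pv_pairfold (key name : List Int → Int) :
    ∀ (xs : List (List Int)) (m : List Int),
      xs.foldl (fun (st : Int × Int) x => if st.1 < key x then (key x, name x) else st) (key m, name m)
        = (key (xs.foldl (fun mm x => if key mm < key x then x else mm) m),
           name (xs.foldl (fun mm x => if key mm < key x then x else mm) m)) := by
  intro xs
  induction xs with
  | nil => intro m; rfl
  | cons x xs ih =>
    intro m
    by_cases hc : key m < key x
    · simp [hc, ih x]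
    · simp [hc, ih m]

-- ===== VERDICT (by name: the statement is the Claim_ definition above) =====
theorem get_highestProject_spec : Claim_equal_get_highestProject := by
  intro data _ hpre
  obtain ⟨hne, -⟩ := hpre
  obtain ⟨d0, rest, rfl⟩ : ∃ d0 rest, data = d0 :: rest := by
    cases data with
    | nil => exact absurd rfl hne
    | cons a b => exact ⟨a, b, rfl⟩
  set key : List Int → Int := fun e => PySem.List.pyGetD e (-1) 0 with hkey
  set name : List Int → Int := fun e => PySem.List.pyGetD e 0 0 with hname
  -- B side: sorted head is the running maximum
  obtain ⟨t', ht'⟩ := pv_foldl_insertBy_head key rest d0 []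
  have hB : get_highestProject_alt (d0 :: rest)
      = name (rest.foldl (fun mm x => if key mm < key x then x else mm) d0) := by
    have hs : PySem.List.sorted (d0 :: rest) key true
        = (rest.foldl (fun m x => if key m < key x then x else m) d0) :: t' := by
      rw [PySem.List.sorted_rev_eq_foldl_insertBy]
      simpa [PySem.List.insertBy] using ht'
    simp [get_highestProject_alt, ← hkey, hs, hname]
  -- A side: the index loop is the same fold over rest
  have hA : get_highestProject (d0 :: rest)
      = name (rest.foldl (fun mm x => if key mm < key x then x else mm) d0) := by
    unfold get_highestProject
    have h0 : PySem.List.pyGetD (d0 :: rest) 0 [] = d0 := by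
      simp [PySem.List.pyGetD, PySem.List.pyGet?, PySem.List.pyIdx?]
    rw [h0]
    have hr := PySem.List.foldl_pyRange_pyGetD (d0 :: rest) ([] : List Int)
      (fun (st : Int × Int) row => if st.1 < key row then (key row, name row) else st)
      (key d0, name d0) (a := 1) (by norm_num)
    simp only [hkey, hname] at hr ⊢
    rw [hr]
    simp only [Int.toNat_one, List.drop_one, List.tail_cons]
    rw [pv_pairfold (fun e => PySem.List.pyGetD e (-1) 0) (fun e => PySem.List.pyGetD e 0 0) rest d0]
  rw [Spec_get_highestProject, hA, hB]
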